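-- pv_equiv track=rewrite | github.com/HMimaroglu/cpp-header-parser | cpp_header_parser.py | _strip_preprocessor
-- ===== SOURCE A (Python) =====
-- def _strip_preprocessor(source: str) -> str:
--     """Remove preprocessor directives (keep the newlines for position tracking)."""
--     lines = source.split("\n")
--     result = []
--     continuation = False
--     for line in lines:
--         stripped = line.strip()
--         if continuation:
--             if stripped.endswith("\\"):
--                 result.append("")
--             else:
--                 continuation = False
--                 result.append("")
--             continue
--         if stripped.startswith("#"):
--             if stripped.endswith("\\"):
--                 continuation = True
--             result.append("")
--         else:
--             result.append(line)
--     return "\n".join(result)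
-- ===== SOURCE B (Python) =====
-- def _strip_preprocessor(source: str) -> str:
--     """Remove preprocessor directives (keep the newlines for position tracking)."""
--     lines = source.split("\n")
--     result = []
--     i = 0
--     n = len(lines)
--     while i < n:
--         cur = lines[i].strip()
--         if cur.startswith("#"):
--             result.append("")
--             while cur.endswith("\\") and i + 1 < n:
--                 i += 1
--                 cur = lines[i].strip()
--                 result.append("")
--         else:
--             result.append(lines[i])
--         i += 1
--     return "\n".join(result)
-- ===== Notes on version B (the rewrite author's own statement) =====
-- stated objective: alternative
-- what changed: Replaces A's boolean continuation flag threaded through a single for-loop with an index-based while loop in which a directive line consumes its whole backslash-continuation chain in a nested inner loop.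
import Mathlib
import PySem

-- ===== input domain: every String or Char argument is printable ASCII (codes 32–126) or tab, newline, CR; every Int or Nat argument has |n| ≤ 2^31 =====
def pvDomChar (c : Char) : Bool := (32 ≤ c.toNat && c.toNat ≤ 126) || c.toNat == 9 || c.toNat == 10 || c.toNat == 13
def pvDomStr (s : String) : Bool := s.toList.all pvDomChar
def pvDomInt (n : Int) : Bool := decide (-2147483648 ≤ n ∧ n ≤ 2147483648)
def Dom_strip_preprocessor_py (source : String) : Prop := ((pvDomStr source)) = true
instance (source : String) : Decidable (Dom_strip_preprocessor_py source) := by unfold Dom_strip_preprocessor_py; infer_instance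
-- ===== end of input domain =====

-- B replaces A's boolean continuation flag with an index-style traversal: a directive line
-- consumes its whole backslash-continuation chain in an inner loop (objective: alternative decomposition).

-- source.split("\n") — sep is the nonempty literal "\n", so split? is always `some`
def pvSplitLines (source : String) : List String :=
  (PySem.Str.split? source "\n").getD []

-- ===== PORT A =====
-- one step of A's for-loop: state = (result, continuation)
def pvAStep (st : List String × Bool) (line : String) : List String × Bool :=
  let stripped := PySem.Str.strip line
  if st.2 then
    if PySem.Str.endswith stripped "\\" then (st.1 ++ [""], st.2)
    else (st.1 ++ [""], false)
  else if PySem.Str.startswith stripped "#" then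
    (st.1 ++ [""], if PySem.Str.endswith stripped "\\" then true else st.2)
  else
    (st.1 ++ [line], st.2)

def strip_preprocessor_py (source : String) : String :=
  let lines := pvSplitLines source
  let st := lines.foldl pvAStep ([], false)
  PySem.Str.join "\n" st.1

-- ===== PORT B =====
-- Source B's outer while-loop (pvBGo, over the remaining lines; 'i + 1 < n' ↔ the remainder is nonempty)
-- and its inner continuation-chain while-loop (pvBCont).
mutual
def pvBGo : List String → List String
  | [] => []
  | l :: rest =>
    if PySem.Str.startswith (PySem.Str.strip l) "#" then
      "" :: pvBCont (PySem.Str.strip l) rest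
    else l :: pvBGo rest
termination_by xs => 2 * xs.length + 1
decreasing_by all_goals (simp; try omega)

def pvBCont (cur : String) (rest : List String) : List String :=
  if PySem.Str.endswith cur "\\" then
    match rest with
    | [] => []
    | l' :: rest' => "" :: pvBCont (PySem.Str.strip l') rest'
  else pvBGo rest
termination_by 2 * rest.length + 2
decreasing_by all_goals (simp; try omega)
end

def strip_preprocessor_py_alt (source : String) : String :=
  PySem.Str.join "\n" (pvBGo (pvSplitLines source))

-- ===== PRECONDITION & SPEC =====
def Spec_strip_preprocessor_py (source : String) (out : String) : Prop := out = strip_preprocessor_py_alt source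
instance (source : String) (out : String) : Decidable (Spec_strip_preprocessor_py source out) := by unfold Spec_strip_preprocessor_py; infer_instance

-- ===== CLAIM (what is proved, stated in full; the proofs are below) =====
def Claim_equal_strip_preprocessor_py : Prop := ∀ (source : String), Dom_strip_preprocessor_py source → Spec_strip_preprocessor_py source (strip_preprocessor_py source)

-- ===== LEMMAS AND PROOFS =====
-- A's result list, computed recursively with the continuation flag explicit
def pvGA : List String → Bool → List String
  | [], _ => []
  | l :: rest, cont =>
    if cont then "" :: pvGA rest (PySem.Str.endswith (PySem.Str.strip l) "\\")
    else if PySem.Str.startswith (PySem.Str.strip l) "#" then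
      "" :: pvGA rest (PySem.Str.endswith (PySem.Str.strip l) "\\")
    else l :: pvGA rest false

lemma pvFoldl_eq_pvGA (lines : List String) : ∀ (res : List String) (cont : Bool),
    (lines.foldl pvAStep (res, cont)).1 = res ++ pvGA lines cont := by
  induction lines with
  | nil => intro res cont; simp [pvGA]
  | cons l rest ih =>
    intro res cont
    simp only [List.foldl_cons, pvGA]
    cases cont with
    | true =>
      rcases h : PySem.Chars.endswith (PySem.Chars.strip l.toList) ['\\'] with _ | _ <;>
        simp [pvAStep, h, ih]
    | false =>
      rcases h1 : PySem.Chars.startswith (PySem.Chars.strip l.toList) ['#'] with _ | _ <;>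
      rcases h2 : PySem.Chars.endswith (PySem.Chars.strip l.toList) ['\\'] with _ | _ <;>
        simp [pvAStep, h1, h2, ih]

lemma pvGA_eq_pvB (lines : List String) :
    pvGA lines false = pvBGo lines ∧
    ∀ cur, pvGA lines (PySem.Str.endswith cur "\\") = pvBCont cur lines := by
  induction lines with
  | nil =>
    refine ⟨by simp [pvGA, pvBGo], fun cur => ?_⟩
    rcases h : PySem.Chars.endswith cur.toList ['\\'] with _ | _ <;>
      simp [pvGA, pvBGo, pvBCont, h]
  | cons l rest ih =>
    have ih2 := ih.2 (PySem.Str.strip l)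
    simp only [PySem.Str.endswith_eq, PySem.Str.toList_strip,
      show "\\".toList = ['\\'] from rfl] at ih2
    have main : pvGA (l :: rest) false = pvBGo (l :: rest) := by
      simp only [pvGA, pvBGo]
      rcases h1 : PySem.Chars.startswith (PySem.Chars.strip l.toList) ['#'] with _ | _ <;>
        simp [h1, ih.1, ih2]
    refine ⟨main, fun cur => ?_⟩
    rcases h : PySem.Chars.endswith cur.toList ['\\'] with _ | _
    · simpa [pvBCont, h] using main
    · simp only [pvBCont]
      simp [pvGA, h, ih2]

-- ===== VERDICT (by name: the statement is the Claim_ definition above) =====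
theorem strip_preprocessor_py_spec : Claim_equal_strip_preprocessor_py := by
  intro source _
  unfold Spec_strip_preprocessor_py strip_preprocessor_py strip_preprocessor_py_alt
  simp only [pvFoldl_eq_pvGA, List.nil_append, (pvGA_eq_pvB _).1]
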